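-- pv_equiv track=rewrite | github.com/badalharit/ShortsMetaForge | modules/vision_engine.py | _aggregate_mood
-- ===== SOURCE A (Python) =====
-- from collections import Counter
-- from typing import Dict, List
--
-- def _aggregate_mood(moods: List[str]) -> str:
--     """Aggregate moods by vote; break ties with center frame mood."""
--     counts = Counter(moods)
--     top_count = max(counts.values())
--     top = [m for m, c in counts.items() if c == top_count]
--     if len(top) == 1:
--         return top[0]
--     center = moods[len(moods) // 2]
--     if center in top:
--         return center
--     return top[0]
-- ===== SOURCE B (Python) =====
-- from collections import Counter
-- from typing import Dict, List
--
-- def _aggregate_mood(moods: List[str]) -> str: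
--     """Aggregate moods by vote; break ties with center frame mood."""
--     counts = Counter(moods)
--     return max(counts, key=lambda m: (counts[m], m == moods[len(moods) // 2]))
-- ===== Notes on version B (the rewrite author's own statement) =====
-- stated objective: idiomatic
-- what changed: Replaces the explicit top-count / top-list / membership-branch cascade by a single argmax over the counter keys with a lexicographic key (vote count, is-center-frame), which encodes the tie-break; first-encountered key wins ties, reproducing top[0].
-- outside the precondition, e.g. on _aggregate_mood([]): A raises ValueError, B raises ValueError
import Mathlib
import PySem

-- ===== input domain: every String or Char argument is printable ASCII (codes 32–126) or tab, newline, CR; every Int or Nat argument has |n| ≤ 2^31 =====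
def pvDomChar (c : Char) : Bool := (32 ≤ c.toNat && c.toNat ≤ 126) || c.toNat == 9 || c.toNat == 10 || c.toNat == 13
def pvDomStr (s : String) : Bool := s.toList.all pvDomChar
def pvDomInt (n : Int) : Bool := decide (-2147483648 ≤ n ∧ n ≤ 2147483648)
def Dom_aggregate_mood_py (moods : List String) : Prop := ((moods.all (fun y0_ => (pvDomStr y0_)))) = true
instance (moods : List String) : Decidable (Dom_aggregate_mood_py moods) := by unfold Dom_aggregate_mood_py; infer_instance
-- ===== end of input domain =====

-- B replaces A's top-count / top-list / membership cascade by a single argmax over the counter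
-- keys with the lexicographic key (vote count, is-center-frame); idiomatic, same cost.

-- ===== PORT A =====
def aggregate_mood_py (moods : List String) : String :=
  let counts := PySem.Dict.counter moods
  match PySem.List.max? counts.values (fun v => v) with
  | none => ""   -- Python: max() of empty raises ValueError; excluded by Pre_
  | some top_count =>
    let top := (counts.items.filter (fun p => p.2 == top_count)).map Prod.fst
    if top.length == 1 then top.headD ""
    else
      let center := PySem.List.pyGetD moods (PySem.Int.floordiv (moods.length : Int) 2) ""
      if top.contains center then center else top.headD ""

-- ===== PORT B =====
-- Python tuple comparison (int, bool) > (int, bool), ported exactly (False < True)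
def pvKeyGt (a b : Int × Bool) : Bool := a.1 > b.1 || (a.1 == b.1 && (a.2 && !b.2))

def aggregate_mood_py_alt (moods : List String) : String :=
  let counts := PySem.Dict.counter moods
  let key : String → Int × Bool := fun m =>
    (counts.getD m 0, m == PySem.List.pyGetD moods (PySem.Int.floordiv (moods.length : Int) 2) "")
  match counts.keys with
  | [] => ""   -- Python: max() of empty raises ValueError; excluded by Pre_
  | k :: ks => ks.foldl (fun best m => if pvKeyGt (key m) (key best) then m else best) k

-- ===== PRECONDITION & SPEC =====
-- Pre_ excludes exactly the empty list, on which Python A raises ValueError (max of empty sequence).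
def Pre_aggregate_mood_py (moods : List String) : Prop := moods ≠ []
instance (moods : List String) : Decidable (Pre_aggregate_mood_py moods) := by unfold Pre_aggregate_mood_py; infer_instance
def pvWitness_aggregate_mood_py : List String := ["calm", "happy", "calm"]

def Spec_aggregate_mood_py (moods : List String) (out : String) : Prop := out = aggregate_mood_py_alt moods
instance (moods : List String) (out : String) : Decidable (Spec_aggregate_mood_py moods out) := by unfold Spec_aggregate_mood_py; infer_instance

-- ===== CLAIM (what is proved, stated in full; the proofs are below) =====
def Claim_equal_aggregate_mood_py : Prop := ∀ (moods : List String), Dom_aggregate_mood_py moods → Pre_aggregate_mood_py moods → Spec_aggregate_mood_py moods (aggregate_mood_py moods)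

-- ===== LEMMAS AND PROOFS =====

-- running maximum of f over b :: l (the invariant value of both ports' extremum loops)
def pvM {α : Type} (f : α → Int) (b : α) (l : List α) : Int :=
  l.foldl (fun a x => max a (f x)) (f b)

theorem pvM_nil {α : Type} (f : α → Int) (b : α) : pvM f b [] = f b := rfl

theorem pvM_cons {α : Type} (f : α → Int) (b x : α) (xs : List α) :
    pvM f b (x :: xs) = pvM f (if f x > f b then x else b) xs := by
  simp only [pvM, List.foldl_cons]
  congr 1
  split <;> omega

theorem le_pvM_of_mem {α : Type} (f : α → Int) :
    ∀ (l : List α) (b y : α), y ∈ b :: l → f y ≤ pvM f b l := by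
  intro l
  induction l with
  | nil => intro b y hy; simp at hy; simp [pvM_nil, hy]
  | cons x xs ih =>
    intro b y hy
    rw [pvM_cons]
    have hb' : f b ≤ pvM f b xs := ih b b (by simp)
    have hx' : f x ≤ pvM f x xs := ih x x (by simp)
    rcases List.mem_cons.1 hy with h | h
    · subst h
      split
      · next hgt => omega
      · exact hb'
    · rcases List.mem_cons.1 h with h | h
      · subst h
        split
        · exact hx'
        · next hgt => omega
      · exact ih _ y (List.mem_cons_of_mem _ h)

theorem pvM_le_of {α : Type} (f : α → Int) :
    ∀ (l : List α) (b : α) (z : Int), (∀ y ∈ b :: l, f y ≤ z) → pvM f b l ≤ z := by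
  intro l
  induction l with
  | nil => intro b z h; simpa [pvM_nil] using h b (by simp)
  | cons x xs ih =>
    intro b z h
    rw [pvM_cons]
    apply ih
    intro y hy
    rcases List.mem_cons.1 hy with h' | h'
    · subst h'
      split <;> [exact h x (by simp); exact h b (by simp)]
    · exact h y (by simp [h'])

theorem pvM_attained {α : Type} (f : α → Int) :
    ∀ (l : List α) (b : α), ∃ y ∈ b :: l, f y = pvM f b l := by
  intro l
  induction l with
  | nil => intro b; exact ⟨b, by simp, (pvM_nil f b).symm⟩
  | cons x xs ih =>
    intro b
    rw [pvM_cons]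
    obtain ⟨y, hy, hfy⟩ := ih (if f x > f b then x else b)
    refine ⟨y, ?_, hfy⟩
    rcases List.mem_cons.1 hy with h | h
    · subst h; split <;> simp
    · simp [h]

theorem pv_find?_congr {α : Type} (p q : α → Bool) :
    ∀ (l : List α), (∀ y ∈ l, p y = q y) → l.find? p = l.find? q := by
  intro l
  induction l with
  | nil => intro _; rfl
  | cons x xs ih =>
    intro h
    simp only [List.find?_cons]
    rw [h x (by simp), ih (fun y hy => h y (by simp [hy]))]

-- the strict-greater argmax loop returns the FIRST element attaining the running maximum
theorem pv_fold_argmax {α : Type} (f : α → Int) :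
    ∀ (l : List α) (b : α),
      l.foldl (fun best x => if f x > f best then x else best) b
        = ((b :: l).find? (fun x => decide (pvM f b l ≤ f x))).getD b := by
  intro l
  induction l with
  | nil =>
    intro b
    simp [pvM_nil]
  | cons x xs ih =>
    intro b
    rw [List.foldl_cons, ih, pvM_cons]
    by_cases hxb : f x > f b
    · rw [if_pos hxb]
      have hxle : f x ≤ pvM f x xs := le_pvM_of_mem f xs x x (by simp)
      obtain ⟨y, hyin, hfy⟩ := pvM_attained f xs x
      cases hfind : (x :: xs).find? (fun z => decide (pvM f x xs ≤ f z)) with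
      | none =>
        exfalso
        have h2 := List.find?_eq_none.1 hfind y hyin
        simp [hfy] at h2
      | some z =>
        rw [List.find?_cons_of_neg (by simp; omega), hfind]
        rfl
    · rw [if_neg hxb]
      have hble : f b ≤ pvM f b xs := le_pvM_of_mem f xs b b (by simp)
      by_cases hb : pvM f b xs ≤ f b
      · rw [List.find?_cons_of_pos (by simpa using hb), List.find?_cons_of_pos (by simpa using hb)]
      · rw [List.find?_cons_of_neg (by simpa using hb), List.find?_cons_of_neg (by simpa using hb),
          List.find?_cons_of_neg (by simp; omega)]

-- the Int encoding of B's lexicographic (count, is-center) key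
def pvE (cnt : String → Int) (c : String) (m : String) : Int :=
  2 * cnt m + (if m = c then (1:Int) else 0)

-- pvKeyGt on B's keys is the strict comparison of the Int encoding
theorem pvKeyGt_iff (c1 c2 : Int) (b1 b2 : Bool) :
    pvKeyGt (c1, b1) (c2, b2) = true ↔
      2 * c1 + (if b1 then (1:Int) else 0) > 2 * c2 + (if b2 then (1:Int) else 0) := by
  simp [pvKeyGt]
  cases b1 <;> cases b2 <;> simp <;> omega

-- find? of the predicate "equals c" returns c when c is a member
theorem pv_find?_eq_self {α : Type} [DecidableEq α] (c : α) (l : List α) (hc : c ∈ l) :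
    l.find? (fun y => decide (y = c)) = some c := by
  cases hfind : l.find? (fun y => decide (y = c)) with
  | none =>
    exfalso
    exact absurd (by simp : decide (c = c) = true)
      (by simpa using List.find?_eq_none.1 hfind c hc)
  | some z =>
    have := List.find?_some hfind
    simp at this
    rw [this]

-- the core list-level equivalence, over the dedup'd key list k :: ks,
-- the count function cnt and the center mood c
theorem pv_main (k : String) (ks : List String) (cnt : String → Int) (c : String) :
    (if (((k :: ks).filter (fun m => cnt m == pvM cnt k ks)).length == 1)
     then ((k :: ks).filter (fun m => cnt m == pvM cnt k ks)).headD ""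
     else if ((k :: ks).filter (fun m => cnt m == pvM cnt k ks)).contains c then c
     else ((k :: ks).filter (fun m => cnt m == pvM cnt k ks)).headD "")
    = ks.foldl (fun best m =>
        if pvKeyGt (cnt m, m == c) (cnt best, best == c) then m else best) k := by
  have hstep : (fun best m =>
        if pvKeyGt (cnt m, m == c) (cnt best, best == c) then m else best)
      = (fun (best m : String) => if pvE cnt c m > pvE cnt c best then m else best) := by
    funext best m
    have hcond : pvKeyGt (cnt m, m == c) (cnt best, best == c) = true ↔
        pvE cnt c m > pvE cnt c best := by
      rw [pvKeyGt_iff]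
      simp only [pvE, beq_iff_eq]
    simp only [hcond]
  rw [hstep, pv_fold_argmax (pvE cnt c) ks k]
  set t := pvM cnt k ks with ht
  obtain ⟨y0, hy0S, hy0⟩ := pvM_attained cnt ks k
  have htmax : ∀ y ∈ k :: ks, cnt y ≤ t := fun y hy => le_pvM_of_mem cnt ks k y hy
  have hEdef : ∀ y, pvE cnt c y = 2 * cnt y + (if y = c then (1:Int) else 0) := fun _ => rfl
  by_cases hc : c ∈ k :: ks ∧ cnt c = t
  · -- the center frame's mood attains the top count: both sides return it
    have hM : pvM (pvE cnt c) k ks = 2 * t + 1 := by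
      apply le_antisymm
      · apply pvM_le_of
        intro y hy
        have := htmax y hy
        rw [hEdef]
        split <;> omega
      · have h1 := le_pvM_of_mem (pvE cnt c) ks k c hc.1
        rw [hEdef c, if_pos rfl] at h1
        have := hc.2
        omega
    have hpred : ∀ y ∈ k :: ks,
        (decide (pvM (pvE cnt c) k ks ≤ pvE cnt c y)) = (decide (y = c)) := by
      intro y hy
      rw [hM, hEdef]
      have := htmax y hy
      by_cases hyc : y = c
      · simp [hyc, hc.2]
      · simp [hyc]
        omega
    rw [pv_find?_congr _ _ (k :: ks) hpred, pv_find?_eq_self c (k :: ks) hc.1]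
    have hctop : c ∈ (k :: ks).filter (fun m => cnt m == t) := by
      simp [List.mem_filter, hc.1, hc.2]
    by_cases h1 : ((k :: ks).filter (fun m => cnt m == t)).length = 1
    · rw [if_pos (by simp [h1])]
      obtain ⟨a, ha⟩ := List.length_eq_one_iff.1 h1
      rw [ha] at hctop ⊢
      simp at hctop
      simp [hctop]
    · have hcont : ((k :: ks).filter (fun m => cnt m == t)).contains c = true := by
        simpa [List.contains_iff_mem] using hctop
      rw [if_neg (by simp [h1]), if_pos hcont]
      rfl
  · -- the center frame's mood does not attain the top count:
    -- both sides return the first mood with the top count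
    have hy0c : y0 ≠ c := fun h => hc ⟨h ▸ hy0S, by rw [h] at hy0; exact hy0⟩
    have hM : pvM (pvE cnt c) k ks = 2 * t := by
      apply le_antisymm
      · apply pvM_le_of
        intro y hy
        have hle := htmax y hy
        rw [hEdef]
        by_cases hyc : y = c
        · have hne : cnt y ≠ t := fun h' => hc ⟨hyc ▸ hy, hyc ▸ h'⟩
          rw [if_pos hyc]
          omega
        · rw [if_neg hyc]
          omega
      · have h1 := le_pvM_of_mem (pvE cnt c) ks k y0 hy0S
        rw [hEdef y0, if_neg hy0c] at h1
        omega
    have hpred : ∀ y ∈ k :: ks,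
        (decide (pvM (pvE cnt c) k ks ≤ pvE cnt c y)) = (cnt y == t) := by
      intro y hy
      rw [hM, hEdef]
      have hle := htmax y hy
      by_cases hyc : y = c
      · have hne : cnt y ≠ t := fun h' => hc ⟨hyc ▸ hy, hyc ▸ h'⟩
        rw [if_pos hyc, Bool.eq_iff_iff]
        simp [beq_iff_eq, hne]
        omega
      · rw [if_neg hyc, Bool.eq_iff_iff]
        simp [beq_iff_eq]
        constructor <;> intro <;> omega
    rw [pv_find?_congr _ _ (k :: ks) hpred]
    cases hfind : (k :: ks).find? (fun y => cnt y == t) with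
    | none =>
      exfalso
      have := List.find?_eq_none.1 hfind y0 hy0S
      simp [hy0] at this
      exact this ht.symm
    | some z =>
      have hcnot : c ∉ (k :: ks).filter (fun m => cnt m == t) := by
        simp only [List.mem_filter, beq_iff_eq]
        rintro ⟨h1, h2⟩
        exact hc ⟨h1, h2⟩
      have hhead : ((k :: ks).filter (fun m => cnt m == t)).headD "" = z := by
        rw [List.headD_eq_head?_getD, List.head?_filter, hfind]
        rfl
      by_cases h1 : ((k :: ks).filter (fun m => cnt m == t)).length = 1
      · rw [if_pos (by simp [h1]), hhead]
        rfl
      · rw [if_neg (by simp [h1]),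
          if_neg (by simpa [List.contains_iff_mem] using hcnot), hhead]
        rfl

-- unfolding both ports to the list level and applying pv_main
theorem pv_ports_eq (moods : List String) (hne : moods ≠ []) :
    aggregate_mood_py moods = aggregate_mood_py_alt moods := by
  have hSne : (PySem.Set.ofList moods : List String) ≠ [] := by
    intro h
    obtain ⟨x, hx⟩ := List.exists_mem_of_ne_nil moods hne
    have : x ∈ (PySem.Set.ofList moods : List String) := (PySem.Set.mem_ofList ..).2 hx
    simp [h] at this
  obtain ⟨k, ks, hS⟩ := List.exists_cons_of_ne_nil hSne
  set c := PySem.List.pyGetD moods (PySem.Int.floordiv (moods.length : Int) 2) "" with hc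
  set cnt : String → Int := fun m => (moods.count m : Int) with hcnt
  have hvalues : (PySem.Dict.counter moods).values
      = (PySem.Set.ofList moods : List String).map cnt := by
    show ((PySem.Dict.counter moods).items).map Prod.snd = _
    rw [PySem.Dict.items_counter]
    simp [List.map_map, hcnt, Function.comp]
  unfold aggregate_mood_py aggregate_mood_py_alt
  simp only [PySem.Dict.keys_counter, PySem.Dict.getD_counter, hvalues, hS]
  rw [List.map_cons, PySem.List.max?_id_cons, List.foldl_map]
  have htop : ∀ tc : Int,
      (((PySem.Dict.counter moods).items).filter (fun p => p.2 == tc)).map Prod.fst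
        = (k :: ks).filter (fun m => cnt m == tc) := by
    intro tc
    rw [PySem.Dict.items_counter, List.filter_map, hS]
    have h1 : (Prod.fst ∘ (fun m : String => (m, (moods.count m : Int))))
        = fun m : String => m := rfl
    simp only [List.map_map, h1, List.map_id_fun', id]
    rfl
  simp only [htop]
  have hMt : List.foldl (fun x y => max x (cnt y)) (cnt k) ks = pvM cnt k ks := rfl
  rw [hMt]
  exact pv_main k ks cnt c

-- ===== VERDICT (by name: the statement is the Claim_ definition above) =====
theorem aggregate_mood_py_spec : Claim_equal_aggregate_mood_py := by
  intro moods _ hpre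
  unfold Spec_aggregate_mood_py
  exact pv_ports_eq moods hpre
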